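-- pv_equiv track=rewrite | github.com/rambasnet/arfftocsv | arffToCsv.py | toCsv
-- ===== SOURCE A (Python) =====
-- def toCsv(content):
--     data = False
--     header = ""
--     newContent = []
--     for line in content:
--         if not data:
--             if "@attribute" in line:
--                 attri = line.split()
--                 columnName = attri[attri.index("@attribute")+1]
--                 header = header + columnName + ","
--             elif "@data" in line:
--                 data = True
--                 header = header[:-1]
--                 header += '\n'
--                 newContent.append(header)
--         else:
--             newContent.append(line)
--     return newContent
-- ===== SOURCE B (Python) =====
-- def toCsv(content):
--     boundary = next((i for i, line in enumerate(content) if "@data" in line), None)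
--     if boundary is None:
--         return []
--     names = []
--     for line in content[:boundary]:
--         if "@attribute" in line:
--             tokens = line.split()
--             names.append(tokens[tokens.index("@attribute") + 1])
--     return [",".join(names) + "\n"] + content[boundary + 1:]
-- ===== Notes on version B (the rewrite author's own statement) =====
-- stated objective: idiomatic
-- what changed: Replaced A's single-pass boolean-flag state machine that accumulates a comma-terminated header string by a two-phase decomposition: locate the first '@data' line, then build the header with ','.join over the attribute names extracted from the prefix and concatenate it with the lines after the boundary; …
-- outside the precondition, e.g. on toCsv(['@data @attribute x']): A returns [], B returns ['\n']
import Mathlib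
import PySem

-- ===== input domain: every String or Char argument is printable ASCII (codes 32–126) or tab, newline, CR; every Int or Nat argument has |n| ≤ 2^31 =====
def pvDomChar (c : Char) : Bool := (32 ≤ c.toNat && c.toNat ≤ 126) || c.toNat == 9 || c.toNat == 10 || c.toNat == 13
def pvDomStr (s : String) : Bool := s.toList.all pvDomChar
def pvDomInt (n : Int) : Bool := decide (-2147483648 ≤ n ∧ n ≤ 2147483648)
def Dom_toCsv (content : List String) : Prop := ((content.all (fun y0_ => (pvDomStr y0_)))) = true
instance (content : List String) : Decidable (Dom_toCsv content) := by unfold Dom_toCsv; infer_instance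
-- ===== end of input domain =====

-- B replaces A's one-pass boolean-flag scan by a two-phase decomposition (find the first
-- '@data' line, then build the header from the prefix by join) — objective: idiomatic.

-- shared helper: `tokens[tokens.index("@attribute")+1]` after `line.split()`, used verbatim
-- by both Pythons. Pre_toCsv guarantees index? hits and the +1 index is in range; the `""`
-- defaults are never reached inside Pre_ (Python raises ValueError / IndexError there).
def pvColName (line : String) : String :=
  let attri := PySem.Str.split₀ line
  match PySem.List.index? attri "@attribute" with
  | some j => (attri[j+1]?).getD ""
  | none => ""

-- ===== PORT A =====
-- the for-loop with state (data, header, newContent); header is kept as List Char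
-- (PySem convention: string concatenation ported on the list side), `header[:-1]` = dropLast.
def pvGoA : List String → Bool → List Char → List String → List String
  | [], _, _, acc => acc
  | l :: ls, false, h, acc =>
    if PySem.Str.isIn "@attribute" l then
      pvGoA ls false (h ++ (pvColName l).toList ++ [',']) acc
    else if PySem.Str.isIn "@data" l then
      pvGoA ls true h (acc ++ [String.ofList (h.dropLast ++ ['\n'])])
    else
      pvGoA ls false h acc
  | l :: ls, true, h, acc => pvGoA ls true h (acc ++ [l])

def toCsv (content : List String) : List String := pvGoA content false [] []

-- ===== PORT B =====
def toCsv_alt (content : List String) : List String :=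
  match content.findIdx? (fun l => PySem.Str.isIn "@data" l) with
  | none => []
  | some i =>
    let names := ((content.take i).filter (fun l => PySem.Str.isIn "@attribute" l)).map pvColName
    String.ofList (PySem.Chars.join [','] (names.map String.toList) ++ ['\n'])
      :: content.drop (i + 1)

-- ===== PRECONDITION & SPEC =====
-- a line containing "@attribute" is well formed: "@attribute" is a whitespace token
-- and is followed by another token
def pvOkAttr (l : String) : Bool :=
  let attri := PySem.Str.split₀ l
  match PySem.List.index? attri "@attribute" with
  | some j => decide (j + 1 < attri.length)
  | none => false

-- Pre_ excludes (i) inputs on which Python A raises: a malformed "@attribute" line before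
-- the data boundary (ValueError from .index or IndexError from +1), and (ii) a defensible
-- corner: inputs whose first '@data'-containing line also contains '@attribute', where A's
-- elif ordering accidentally treats the line as an attribute while B treats it as the
-- data boundary and neither reading is specified.
def Pre_toCsv (content : List String) : Prop :=
  (∀ l ∈ content.takeWhile (fun l => !PySem.Str.isIn "@data" l),
      PySem.Str.isIn "@attribute" l = true → pvOkAttr l = true)
  ∧ (∀ l ∈ (content.dropWhile (fun l => !PySem.Str.isIn "@data" l)).take 1,
      PySem.Str.isIn "@attribute" l = false)
instance (content : List String) : Decidable (Pre_toCsv content) := by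
  unfold Pre_toCsv; infer_instance

def pvWitness_toCsv : List String :=
  ["@relation r", "@attribute age numeric", "@attribute name string", "@data", "1,bob"]

def Spec_toCsv (content : List String) (out : List String) : Prop := out = toCsv_alt content
instance (content : List String) (out : List String) : Decidable (Spec_toCsv content out) := by unfold Spec_toCsv; infer_instance

-- ===== CLAIM (what is proved, stated in full; the proofs are below) =====
def Claim_equal_toCsv : Prop := ∀ (content : List String), Dom_toCsv content → Pre_toCsv content → Spec_toCsv content (toCsv content)

-- ===== LEMMAS AND PROOFS =====

-- A's effective boundary predicate, B's boundary predicate, the attribute predicate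
def pvP (l : String) : Bool := PySem.Str.isIn "@data" l && ! PySem.Str.isIn "@attribute" l
def pvQ (l : String) : Bool := PySem.Str.isIn "@data" l
def pvAttr (l : String) : Bool := PySem.Str.isIn "@attribute" l

-- the header chars contributed by a list of lines in A's loop
def pvF (ls : List String) : List Char :=
  ((ls.filter pvAttr).map (fun l => (pvColName l).toList ++ [','])).flatten

-- the common normal form both ports are reduced to (stated with A's predicate pvP)
def pvNorm (content : List String) : List String :=
  match content.findIdx? pvP with
  | none => []
  | some i => String.ofList ((pvF (content.take i)).dropLast ++ ['\n']) :: content.drop (i + 1)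

lemma pvGoA_true (ls : List String) (h : List Char) (acc : List String) :
    pvGoA ls true h acc = acc ++ ls := by
  induction ls generalizing acc with
  | nil => simp [pvGoA]
  | cons l ls ih => simp [pvGoA, ih]

lemma pvGoA_false (ls : List String) (h : List Char) (acc : List String) :
    pvGoA ls false h acc = acc ++
      (match ls.findIdx? pvP with
       | none => []
       | some i =>
         String.ofList ((h ++ pvF (ls.take i)).dropLast ++ ['\n']) :: ls.drop (i + 1)) := by
  induction ls generalizing h acc with
  | nil => simp [pvGoA]
  | cons l ls ih =>
    have e : pvGoA (l :: ls) false h acc =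
        if pvAttr l = true then pvGoA ls false (h ++ (pvColName l).toList ++ [',']) acc
        else if PySem.Str.isIn "@data" l = true then
          pvGoA ls true h (acc ++ [String.ofList (h.dropLast ++ ['\n'])])
        else pvGoA ls false h acc := rfl
    cases ha : PySem.Str.isIn "@attribute" l with
    | true =>
      have hA : pvAttr l = true := ha
      have hp : pvP l = false := by simp only [pvP, ha, Bool.not_true, Bool.and_false]
      rw [e, if_pos hA, ih, List.findIdx?_cons, if_neg (by simp [hp])]
      cases hfi : ls.findIdx? pvP with
      | none => simp
      | some i =>
        simp only [Option.map_some]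
        have ht : (l :: ls).take (i + 1) = l :: ls.take i := rfl
        have hF : pvF (l :: ls.take i) = (pvColName l).toList ++ [','] ++ pvF (ls.take i) := by
          simp [pvF, hA]
        rw [ht, hF]
        simp [List.append_assoc]
    | false =>
      have hA : pvAttr l = false := ha
      cases hd : PySem.Str.isIn "@data" l with
      | true =>
        have hp : pvP l = true := by simp only [pvP, ha, hd, Bool.not_false, Bool.and_self]
        rw [e, if_neg (by simp [hA]), if_pos hd, pvGoA_true, List.findIdx?_cons, if_pos hp]
        simp [pvF]
      | false =>
        have hp : pvP l = false := by simp only [pvP, hd, Bool.false_and]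
        rw [e, if_neg (by simp [hA]), if_neg (by rw [hd]; exact Bool.false_ne_true), ih, List.findIdx?_cons,
          if_neg (by simp [hp])]
        cases hfi : ls.findIdx? pvP with
        | none => simp
        | some i =>
          simp only [Option.map_some]
          have ht : (l :: ls).take (i + 1) = l :: ls.take i := rfl
          have hF : pvF (l :: ls.take i) = pvF (ls.take i) := by
            simp [pvF, hA]
          rw [ht, hF]
          simp

-- flatten of name++"," blocks, minus the trailing comma, is the comma-join
lemma pvJoin (xss : List (List Char)) :
    ((xss.map (fun x => x ++ [','])).flatten).dropLast = PySem.Chars.join [','] xss := by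
  induction xss with
  | nil => simp [PySem.Chars.join_nil]
  | cons a t ih =>
    cases t with
    | nil => simp [PySem.Chars.join_singleton]
    | cons b t' =>
      rw [PySem.Chars.join_cons_cons]
      simp only [List.map_cons, List.flatten_cons] at ih ⊢
      rw [List.dropLast_append_of_ne_nil
        (l := (b ++ [',']) ++ (List.map (fun x => x ++ [',']) t').flatten) (by simp), ih]

-- under the second conjunct of Pre_, A's boundary and B's boundary coincide
lemma pvFind (content : List String)
    (h2 : ∀ l ∈ (content.dropWhile (fun l => !PySem.Str.isIn "@data" l)).take 1,
      PySem.Str.isIn "@attribute" l = false) :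
    content.findIdx? pvP = content.findIdx? pvQ := by
  induction content with
  | nil => rfl
  | cons l ls ih =>
    cases hq : pvQ l with
    | true =>
      have hdrop : (l :: ls).dropWhile (fun l => !PySem.Str.isIn "@data" l) = l :: ls := by
        rw [List.dropWhile_cons_of_neg]; simp [pvQ] at hq; simp [hq]
      have hA : PySem.Str.isIn "@attribute" l = false := by
        apply h2; rw [hdrop]; simp
      have hp : pvP l = true := by simp [pvP, pvQ] at hq ⊢; exact ⟨hq, hA⟩
      rw [List.findIdx?_cons, List.findIdx?_cons, if_pos hp, if_pos hq]
    | false =>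
      have hp : pvP l = false := by simp [pvP, pvQ] at hq ⊢; simp [hq]
      have hdrop : (l :: ls).dropWhile (fun l => !PySem.Str.isIn "@data" l) =
          ls.dropWhile (fun l => !PySem.Str.isIn "@data" l) := by
        rw [List.dropWhile_cons_of_pos]; simp [pvQ] at hq; simp [hq]
      rw [List.findIdx?_cons, List.findIdx?_cons, if_neg (by simp [hp]),
        if_neg (by simp [hq]), ih (by rw [← hdrop]; exact h2)]

lemma toCsv_eq_norm (content : List String) : toCsv content = pvNorm content := by
  unfold toCsv pvNorm
  rw [pvGoA_false]
  simp

lemma toCsv_alt_eq_norm (content : List String)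
    (h2 : ∀ l ∈ (content.dropWhile (fun l => !PySem.Str.isIn "@data" l)).take 1,
      PySem.Str.isIn "@attribute" l = false) :
    toCsv_alt content = pvNorm content := by
  unfold toCsv_alt pvNorm
  have hQ : (fun l => PySem.Str.isIn "@data" l) = pvQ := rfl
  have hA : (fun l => PySem.Str.isIn "@attribute" l) = pvAttr := rfl
  rw [hQ, hA, ← pvFind content h2]
  cases hfi : content.findIdx? pvP with
  | none => rfl
  | some i =>
    simp only []
    congr 1
    congr 1
    rw [← pvJoin ((((content.take i).filter pvAttr).map pvColName).map String.toList)]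
    congr 1
    simp [pvF, List.map_map]
    rfl

-- ===== VERDICT (by name: the statement is the Claim_ definition above) =====
theorem toCsv_spec : Claim_equal_toCsv := by
  intro content _ hpre
  unfold Spec_toCsv
  rw [toCsv_eq_norm, toCsv_alt_eq_norm content hpre.2]
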